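-- pv_equiv track=rewrite | github.com/chengyitang/interview-algo-practices | tiktok-grad-oa/linguistics_research_tool.py | solution
-- ===== SOURCE A (Python) =====
-- def solution(text: str) -> int:
--     """
--     Count the number of substrings of length 3 that contain exactly two vowels.
--     Uses sliding window approach for O(n) time complexity.
--     """
--     if len(text) < 3:
--         return 0
--
--     vowels = set("aeiou")
--     count = 0
--
--     # Count vowels in the first window of size 3
--     vowel_count = 0
--     for c in text[:3]:
--         if c in vowels:
--             vowel_count += 1
--
--     # Check if first window has exactly 2 vowels
--     if vowel_count == 2:
--         count += 1
--
--     # Slide the window and update vowel count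
--     for i in range(3, len(text)):
--         # Remove the vowel count of the character leaving the window
--         if text[i-3] in vowels:
--             vowel_count -= 1
--
--         # Add the vowel count of the character entering the window
--         if text[i] in vowels:
--             vowel_count += 1
--
--         # Check if current window has exactly 2 vowels
--         if vowel_count == 2:
--             count += 1
--
--     return count
-- ===== SOURCE B (Python) =====
-- def solution(text: str) -> int:
--     """
--     Count length-3 substrings with exactly two vowels, via a prefix-sum
--     table instead of sliding-window maintenance.
--     """
--     vowels = set("aeiou")
--     pre = [0]
--     s = 0
--     for c in text:
--         s += 1 if c in vowels else 0
--         pre.append(s)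
--     count = 0
--     for i in range(len(text) - 2):
--         if pre[i + 3] - pre[i] == 2:
--             count += 1
--     return count
-- ===== Notes on version B (the rewrite author's own statement) =====
-- stated objective: alternative
-- what changed: Replaces the sliding-window add/remove maintenance of a vowel counter with a precomputed prefix-sum table pre (pre[i] = vowels in text[:i]) queried once per window as pre[i+3]-pre[i] == 2.
import Mathlib
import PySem

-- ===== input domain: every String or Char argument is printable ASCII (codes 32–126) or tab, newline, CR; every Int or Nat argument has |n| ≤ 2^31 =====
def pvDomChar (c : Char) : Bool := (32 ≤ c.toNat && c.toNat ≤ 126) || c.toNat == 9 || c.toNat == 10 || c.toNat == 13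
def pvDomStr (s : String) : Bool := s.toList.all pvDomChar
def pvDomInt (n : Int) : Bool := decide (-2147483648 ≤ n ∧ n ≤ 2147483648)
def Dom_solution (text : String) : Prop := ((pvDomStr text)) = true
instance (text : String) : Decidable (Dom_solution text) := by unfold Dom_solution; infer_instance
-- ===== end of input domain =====

-- B replaces A's sliding-window vowel-counter maintenance with a precomputed
-- prefix-sum table queried once per window (alternative decomposition, same O(n) cost).

-- ===== PORT A =====
-- vowels = set("aeiou")
def pvVowels : PySem.Set Char := PySem.Set.ofList "aeiou".toList

def solution (text : String) : Int :=
  let l := text.toList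
  if l.length < 3 then 0
  else
    -- vowel_count over the first window text[:3]
    let vowel_count : Int :=
      (PySem.List.slice l none (some 3)).foldl
        (fun vc c => if PySem.Set.contains pvVowels c then vc + 1 else vc) 0
    let count : Int := if vowel_count = 2 then 1 else 0
    -- for i in range(3, len(text)): slide the window
    -- (text[i-3] / text[i] are always in range here, so pyGetD is exact)
    let st := (PySem.List.pyRange 3 (l.length : Int) 1).foldl
      (fun (st : Int × Int) i =>
        let vc := if PySem.Set.contains pvVowels (PySem.List.pyGetD l (i - 3) ' ')
                  then st.1 - 1 else st.1
        let vc := if PySem.Set.contains pvVowels (PySem.List.pyGetD l i ' ')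
                  then vc + 1 else vc
        (vc, if vc = 2 then st.2 + 1 else st.2))
      (vowel_count, count)
    st.2

-- ===== PORT B =====
def solution_alt (text : String) : Int :=
  let l := text.toList
  -- build the prefix-sum table: pre[i] = number of vowels in text[:i]
  let st := l.foldl
    (fun (st : List Int × Int) c =>
      let s := st.2 + (if PySem.Set.contains pvVowels c then 1 else 0)
      (st.1 ++ [s], s)) ([0], 0)
  let pre := st.1
  -- for i in range(len(text) - 2): query the table per window
  (PySem.List.pyRange 0 ((l.length : Int) - 2) 1).foldl
    (fun count i =>
      if PySem.List.pyGetD pre (i + 3) 0 - PySem.List.pyGetD pre i 0 = 2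
      then count + 1 else count)
    0

-- ===== PRECONDITION & SPEC =====
def Spec_solution (text : String) (out : Int) : Prop := out = solution_alt text
instance (text : String) (out : Int) : Decidable (Spec_solution text out) := by unfold Spec_solution; infer_instance

-- ===== CLAIM (what is proved, stated in full; the proofs are below) =====
def Claim_equal_solution : Prop := ∀ (text : String), Dom_solution text → Spec_solution text (solution text)

-- ===== LEMMAS AND PROOFS =====

-- vowel indicator and prefix vowel count
def pvV (c : Char) : Int := if PySem.Set.contains pvVowels c then 1 else 0

def pvS (l : List Char) (k : Nat) : Int := ((l.take k).map pvV).sum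

-- windows with exactly two vowels among the first m windows
def pvN (l : List Char) (m : Nat) : Int :=
  ((List.range m).countP (fun j => decide (pvS l (j+3) - pvS l j = 2)) : Nat)

lemma pvS_succ (l : List Char) (k : Nat) (hk : k < l.length) :
    pvS l (k+1) = pvS l k + pvV (l.getD k ' ') := by
  unfold pvS
  rw [List.map_take, List.map_take, List.sum_take_succ _ k (by simpa using hk)]
  simp [List.getD, List.getElem?_eq_getElem hk]

lemma pvN_succ (l : List Char) (m : Nat) :
    pvN l (m+1) = pvN l m + (if pvS l (m+3) - pvS l m = 2 then 1 else 0) := by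
  simp only [pvN, List.range_succ, List.countP_append]
  split_ifs with h <;> simp [h]

lemma foldl_vcount (xs : List Char) : ∀ a : Int,
    xs.foldl (fun vc c => if PySem.Set.contains pvVowels c then vc + 1 else vc) a
      = a + (xs.map pvV).sum := by
  induction xs with
  | nil => simp
  | cons c cs ih =>
    intro a
    simp only [List.foldl_cons, List.map_cons, List.sum_cons, ih]
    unfold pvV; split_ifs <;> ring

-- B's prefix list in closed form
def pvPresums (l : List Char) (s : Int) : List Int :=
  match l with
  | [] => []
  | c :: cs => (s + pvV c) :: pvPresums cs (s + pvV c)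

lemma foldB_pre (l : List Char) : ∀ (acc : List Int) (s : Int),
    l.foldl (fun (st : List Int × Int) c =>
        (st.1 ++ [st.2 + (if PySem.Set.contains pvVowels c then 1 else 0)],
         st.2 + (if PySem.Set.contains pvVowels c then 1 else 0))) (acc, s)
      = (acc ++ pvPresums l s, s + (l.map pvV).sum) := by
  induction l with
  | nil => simp [pvPresums]
  | cons c cs ih =>
    intro acc s
    rw [List.foldl_cons, ih]
    refine Prod.ext ?_ ?_
    · show acc ++ [s + _] ++ pvPresums cs _ = acc ++ pvPresums (c :: cs) s
      simp [pvPresums, pvV, List.append_assoc]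
    · show s + _ + (cs.map pvV).sum = s + ((c :: cs).map pvV).sum
      simp [pvV]
      ring

lemma pvPresums_getD (l : List Char) : ∀ (s : Int) (k : Nat), k < l.length →
    (pvPresums l s).getD k 0 = s + pvS l (k+1) := by
  induction l with
  | nil => intro s k hk; simp at hk
  | cons c cs ih =>
    intro s k hk
    cases k with
    | zero => simp [pvPresums, pvS]
    | succ k =>
      simp only [pvPresums, List.getD_cons_succ]
      rw [ih _ k (by simpa using hk)]
      simp only [pvS, List.take_succ_cons, List.map_cons, List.sum_cons]
      ring

lemma pre_getD (l : List Char) (k : Nat) (hk : k ≤ l.length) :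
    (0 :: pvPresums l 0).getD k 0 = pvS l k := by
  cases k with
  | zero => simp [pvS]
  | succ k =>
    simp only [List.getD_cons_succ]
    rw [pvPresums_getD l 0 k (by omega)]
    simp

-- A's main loop characterised
lemma loopA (l : List Char) : ∀ m : Nat, 3 ≤ m → m ≤ l.length →
    (PySem.List.pyRange 3 (m : Int) 1).foldl
      (fun (st : Int × Int) i =>
        (if PySem.Set.contains pvVowels (PySem.List.pyGetD l i ' ')
         then (if PySem.Set.contains pvVowels (PySem.List.pyGetD l (i - 3) ' ') then st.1 - 1 else st.1) + 1
         else (if PySem.Set.contains pvVowels (PySem.List.pyGetD l (i - 3) ' ') then st.1 - 1 else st.1),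
         if (if PySem.Set.contains pvVowels (PySem.List.pyGetD l i ' ')
             then (if PySem.Set.contains pvVowels (PySem.List.pyGetD l (i - 3) ' ') then st.1 - 1 else st.1) + 1
             else (if PySem.Set.contains pvVowels (PySem.List.pyGetD l (i - 3) ' ') then st.1 - 1 else st.1)) = 2
         then st.2 + 1 else st.2))
      (pvS l 3, if pvS l 3 = 2 then 1 else 0)
    = (pvS l m - pvS l (m - 3), pvN l (m - 2)) := by
  intro m hm
  induction m, hm using Nat.le_induction with
  | base =>
    intro _
    rw [PySem.List.pyRange_one_eq_nil (by norm_num)]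
    simp only [List.foldl_nil]
    have h0 : pvS l 0 = 0 := by simp [pvS]
    have h1 : pvN l 1 = if pvS l 3 = 2 then 1 else 0 := by
      simp only [pvN, List.range_succ, List.range_zero, List.nil_append,
        List.countP_cons, List.countP_nil, h0]
      by_cases h : pvS l 3 = 2 <;> simp [h]
    simp [h0, h1]
  | succ m hm3 ih =>
    intro hlen
    have hmlt : m < l.length := by omega
    have hcast : ((m : Int) + 1) = ((m + 1 : Nat) : Int) := by push_cast; ring
    rw [← hcast, PySem.List.pyRange_one_succ_right (by exact_mod_cast hm3 : (3:Int) ≤ (m:Int))]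
    rw [List.foldl_append, ih (by omega)]
    simp only [List.foldl_cons, List.foldl_nil]
    have hm3' : ((m : Int) - 3) = ((m - 3 : Nat) : Int) := by omega
    rw [hm3', PySem.List.pyGetD_natCast, PySem.List.pyGetD_natCast]
    have hS1 : pvS l (m+1) = pvS l m + pvV (l.getD m ' ') := pvS_succ l m hmlt
    have hS2 : pvS l (m-3+1) = pvS l (m-3) + pvV (l.getD (m-3) ' ') := pvS_succ l (m-3) (by omega)
    have e1 : m - 3 + 1 = m + 1 - 3 := by omega
    have hvc : (if PySem.Set.contains pvVowels (l.getD m ' ')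
          then (if PySem.Set.contains pvVowels (l.getD (m-3) ' ')
                then pvS l m - pvS l (m-3) - 1 else pvS l m - pvS l (m-3)) + 1
          else (if PySem.Set.contains pvVowels (l.getD (m-3) ' ')
                then pvS l m - pvS l (m-3) - 1 else pvS l m - pvS l (m-3)))
        = pvS l (m+1) - pvS l (m+1-3) := by
      rw [hS1, ← e1, hS2]
      unfold pvV
      split_ifs <;> ring
    rw [hvc]
    have e2 : m + 1 - 2 = (m - 2) + 1 := by omega
    have e3 : m - 2 + 3 = m + 1 := by omega
    have e4 : m + 1 - 3 = m - 2 := by omega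
    rw [e2, pvN_succ, e3, e4]
    split_ifs <;> simp

-- B's counting loop characterised
lemma loopB (l : List Char) (pre : List Int)
    (hpre : ∀ k : Nat, k ≤ l.length → pre.getD k 0 = pvS l k) :
    ∀ m : Nat, m + 2 ≤ l.length →
    (PySem.List.pyRange 0 (m : Int) 1).foldl
      (fun count i =>
        if PySem.List.pyGetD pre (i + 3) 0 - PySem.List.pyGetD pre i 0 = 2
        then count + 1 else count) 0
    = pvN l m := by
  intro m
  induction m with
  | zero =>
    intro _
    rw [PySem.List.pyRange_one_eq_nil (by norm_num)]
    simp [pvN]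
  | succ m ih =>
    intro hlen
    have hcast : ((m : Int) + 1) = ((m + 1 : Nat) : Int) := by push_cast; ring
    rw [← hcast, PySem.List.pyRange_one_succ_right (by positivity)]
    rw [List.foldl_append, ih (by omega)]
    simp only [List.foldl_cons, List.foldl_nil]
    have h3 : ((m : Int) + 3) = ((m + 3 : Nat) : Int) := by push_cast; ring
    rw [h3, PySem.List.pyGetD_natCast, PySem.List.pyGetD_natCast]
    rw [hpre (m+3) (by omega), hpre m (by omega)]
    rw [pvN_succ]
    split_ifs <;> ring

-- ===== VERDICT (by name: the statement is the Claim_ definition above) =====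
theorem solution_spec : Claim_equal_solution := by
  intro text _
  unfold Spec_solution solution solution_alt
  set l := text.toList with hl
  simp only
  rw [foldB_pre l [0] 0]
  by_cases h3 : l.length < 3
  · rw [if_pos h3]
    rw [PySem.List.pyRange_one_eq_nil (by omega : ((l.length : Int) - 2) ≤ 0)]
    simp
  · rw [if_neg h3]
    have hlen : 3 ≤ l.length := by omega
    have hslice : PySem.List.slice l none (some 3) = l.take 3 := by
      rw [show (3:Int) = ((3:Nat):Int) from rfl, PySem.List.slice_to_natCast]
    rw [hslice, foldl_vcount]
    have hS3 : (0 : Int) + ((l.take 3).map pvV).sum = pvS l 3 := by simp [pvS]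
    rw [hS3, loopA l l.length hlen le_rfl]
    have hpre1 : ([0] ++ pvPresums l 0 : List Int) = 0 :: pvPresums l 0 := by simp
    have hc2 : ((l.length : Int) - 2) = ((l.length - 2 : Nat) : Int) := by omega
    rw [hpre1, hc2, loopB l (0 :: pvPresums l 0) (pre_getD l) (l.length - 2) (by omega)]
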